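-- pv_equiv track=rewrite | github.com/SAIKUMARREDDYGANUGAPENTA/Spell-Suggestion | a.py | creatNIndex
-- ===== SOURCE A (Python) =====
-- def generateNGrams(n,word):
--     nGrams=[]
--     i = 0
--     size = len(word)
--     while((i+n-1)<size):
--         nGrams.append(word[i:i+n])
--         i+=1
--
--     return nGrams
--
-- def creatNIndex(n,vocabulary):
--     nIndex = dict()
--     for word in vocabulary:
--         Ngrams=generateNGrams(n,word)
--         for gram in Ngrams:
--             if(nIndex.get(gram)==None):
--                 nIndex[gram]=[word]
--             else:
--                 tlist=nIndex[gram]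
--                 tlist.append(word)
--                 nIndex[gram]=tlist
--     return nIndex
-- ===== SOURCE B (Python) =====
-- def generateNGrams(n, word):
--     return [word[i:i+n] for i in range(len(word) - n + 1)]
--
-- def creatNIndex(n, vocabulary):
--     pairs = [(gram, word) for word in vocabulary for gram in generateNGrams(n, word)]
--     keys = list(dict.fromkeys(gram for gram, _ in pairs))
--     return {g: [w for gram, w in pairs if gram == g] for g in keys}
-- ===== Notes on version B (the rewrite author's own statement) =====
-- stated objective: alternative
-- what changed: Replaces A's incremental dict-insertion (get-then-append-then-reinsert per gram) with a flat build of all (gram, word) pairs, an ordered dedup of the grams, and a grouping comprehension that collects each gram's words by filtering the pair list; generateNGrams becomes a range comprehension instead of a while loop.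
import Mathlib
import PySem

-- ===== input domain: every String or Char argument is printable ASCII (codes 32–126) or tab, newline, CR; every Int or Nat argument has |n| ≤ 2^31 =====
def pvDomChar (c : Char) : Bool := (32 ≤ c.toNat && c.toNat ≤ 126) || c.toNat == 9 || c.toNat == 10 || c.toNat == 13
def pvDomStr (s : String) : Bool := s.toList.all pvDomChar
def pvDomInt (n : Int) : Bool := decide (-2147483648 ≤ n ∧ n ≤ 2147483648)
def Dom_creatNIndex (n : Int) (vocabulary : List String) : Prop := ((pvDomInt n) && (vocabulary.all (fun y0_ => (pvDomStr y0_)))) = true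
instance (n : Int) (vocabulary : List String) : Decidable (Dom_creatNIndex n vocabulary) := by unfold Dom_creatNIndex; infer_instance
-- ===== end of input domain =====

-- B replaces A's incremental dict insertion by flatten-all-pairs, ordered-dedup of grams,
-- then a filter-based grouping comprehension (alternative decomposition, not faster).

-- ===== PORT A =====
-- while ((i+n-1) < size): nGrams.append(word[i:i+n]); i += 1
def genNGramsLoop (n : Int) (word : String) (size : Int) (i : Int) (nGrams : List String) : List String :=
  if i + n - 1 < size then
    genNGramsLoop n word size (i + 1) (nGrams ++ [PySem.Str.slice word (some i) (some (i + n))])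
  else nGrams
termination_by (size - (i + n - 1)).toNat
decreasing_by omega

def generateNGrams (n : Int) (word : String) : List String :=
  genNGramsLoop n word (PySem.Str.len word) 0 []

def creatNIndex (n : Int) (vocabulary : List String) : List (String × List String) :=
  (vocabulary.foldl (fun nIndex word =>
      (generateNGrams n word).foldl (fun nIndex gram =>
        match nIndex.get? gram with
        | none => nIndex.insert gram [word]
        | some tlist => nIndex.insert gram (tlist ++ [word])) nIndex)
    PySem.Dict.empty).items

-- ===== PORT B =====
-- generateNGrams as a range comprehension
def generateNGramsB (n : Int) (word : String) : List String :=
  (PySem.List.pyRange 0 (PySem.Str.len word - n + 1) 1).map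
    (fun i => PySem.Str.slice word (some i) (some (i + n)))

def creatNIndex_alt (n : Int) (vocabulary : List String) : List (String × List String) :=
  let pairs := vocabulary.flatMap (fun word => (generateNGramsB n word).map (fun gram => (gram, word)))
  let keys := PySem.List.dedup (pairs.map Prod.fst)
  keys.map (fun g => (g, (pairs.filter (fun p => p.1 == g)).map Prod.snd))

-- ===== PRECONDITION & SPEC =====
def Spec_creatNIndex (n : Int) (vocabulary : List String) (out : List (String × List String)) : Prop := out = creatNIndex_alt n vocabulary
instance (n : Int) (vocabulary : List String) (out : List (String × List String)) : Decidable (Spec_creatNIndex n vocabulary out) := by unfold Spec_creatNIndex; infer_instance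

-- ===== CLAIM (what is proved, stated in full; the proofs are below) =====
def Claim_equal_creatNIndex : Prop := ∀ (n : Int) (vocabulary : List String), Dom_creatNIndex n vocabulary → Spec_creatNIndex n vocabulary (creatNIndex n vocabulary)

-- ===== LEMMAS AND PROOFS =====

-- the while loop of generateNGrams is the map over range(size - n + 1) starting at i
theorem genNGramsLoop_eq (n : Int) (word : String) (size i : Int) (acc : List String) :
    genNGramsLoop n word size i acc
      = acc ++ (PySem.List.pyRange i (size - n + 1) 1).map
          (fun j => PySem.Str.slice word (some j) (some (j + n))) := by
  fun_induction genNGramsLoop with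
  | case1 i acc h ih =>
      rw [ih, PySem.List.pyRange_one_cons (show i < size - n + 1 by omega)]
      simp only [List.map_cons, List.append_assoc, List.singleton_append]
  | case2 i acc h =>
      rw [PySem.List.pyRange_one_eq_nil (by omega)]
      simp

theorem generateNGrams_eq (n : Int) (word : String) :
    generateNGrams n word = generateNGramsB n word := by
  simp [generateNGrams, generateNGramsB, genNGramsLoop_eq]

-- A's per-gram step is dict.modify with default []
theorem step_eq_modify (d : PySem.Dict String (List String)) (gram word : String) :
    (match d.get? gram with
     | none => d.insert gram [word]
     | some tlist => d.insert gram (tlist ++ [word]))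
      = d.modify gram [] (· ++ [word]) := by
  cases h : d.get? gram <;> simp [PySem.Dict.modify, PySem.Dict.getD, h]

theorem find?_beq_self {α : Type} [BEq α] [LawfulBEq α] (ks : List α) (g : α) :
    ks.find? (fun k => k == g) = if g ∈ ks then some g else none := by
  induction ks with
  | nil => simp
  | cons k t ih =>
      by_cases hk : k = g
      · subst hk; simp
      · rw [List.find?_cons_of_neg (by simp [hk])]
        have hgk : g ≠ k := fun h => hk h.symm
        simp [ih, List.mem_cons, hgk]

theorem filter_eq_nil_of_not_mem_fst {α β : Type} [BEq α] [LawfulBEq α]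
    (qs : List (α × β)) (g : α) (h : g ∉ qs.map Prod.fst) :
    qs.filter (fun p => p.1 == g) = [] := by
  rw [List.filter_eq_nil_iff]
  intro p hp
  simp only [beq_iff_eq]
  intro hpg
  exact h (List.mem_map.mpr ⟨p, hp, hpg⟩)

-- the grouped image of a pair list, exactly as creatNIndex_alt assembles it
def groupPairs (ps : List (String × String)) : List (String × List String) :=
  (PySem.List.dedup (ps.map Prod.fst)).map
    (fun g => (g, (ps.filter (fun p => p.1 == g)).map Prod.snd))

theorem get?_groupPairs (ps : List (String × String)) (g : String) :
    (PySem.Dict.mk (groupPairs ps)).get? g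
      = if g ∈ ps.map Prod.fst then some ((ps.filter (fun p => p.1 == g)).map Prod.snd)
        else none := by
  simp only [PySem.Dict.get?, groupPairs]
  rw [List.find?_map]
  have : ((fun p => p.1 == g) ∘ fun g' =>
      (g', (ps.filter (fun p => p.1 == g')).map Prod.snd)) = (fun k => k == g) := by
    funext k; rfl
  rw [this, find?_beq_self]
  by_cases h : g ∈ ps.map Prod.fst <;>
    simp [h]

theorem contains_groupPairs (ps : List (String × String)) (g : String) :
    (PySem.Dict.mk (groupPairs ps)).contains g = decide (g ∈ ps.map Prod.fst) := by
  rw [PySem.Dict.contains_eq_isSome_get?, get?_groupPairs]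
  by_cases h : g ∈ ps.map Prod.fst <;> simp [h]

-- invariant: folding the modify-append step over the pairs builds exactly the grouped list
theorem build_eq_groupPairs (ps : List (String × String)) :
    (ps.foldl (fun d p => d.modify p.1 [] (· ++ [p.2])) PySem.Dict.empty).items
      = groupPairs ps := by
  induction ps using List.reverseRecOn with
  | nil => simp [groupPairs, PySem.Dict.empty, PySem.List.dedup]
  | append_singleton qs p ih =>
      obtain ⟨g, w⟩ := p
      rw [List.foldl_append, List.foldl_cons, List.foldl_nil]
      have hd : qs.foldl (fun d p => d.modify p.1 [] (· ++ [p.2])) PySem.Dict.empty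
          = PySem.Dict.mk (groupPairs qs) := by
        cases h : qs.foldl (fun d p => d.modify p.1 [] (· ++ [p.2])) PySem.Dict.empty with
        | mk items => rw [← ih, h]
      rw [hd]
      simp only [PySem.Dict.modify, PySem.Dict.getD, get?_groupPairs]
      by_cases hg : g ∈ qs.map Prod.fst
      · -- gram already present: insert overwrites in place
        rw [PySem.Dict.items_insert]
        rw [contains_groupPairs]
        simp only [hg, decide_true, Option.getD_some, if_pos]
        simp only [groupPairs]
        rw [List.map_map, List.map_append, List.map_cons, List.map_nil]
        rw [PySem.List.dedup_eq_ofList, PySem.List.dedup_eq_ofList,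
            PySem.Set.ofList_append_singleton, PySem.Set.add_of_mem (by
              rw [PySem.Set.mem_ofList]; exact hg)]
        apply List.map_congr_left
        intro g' hg'
        simp only [Function.comp_apply, List.filter_append]
        by_cases he : g' = g
        · subst he
          simp
        · have hge : g ≠ g' := fun h => he h.symm
          simp [he, hge]
      · -- new gram: insert appends at the end
        rw [PySem.Dict.items_insert]
        rw [contains_groupPairs]
        simp only [hg, decide_false, Bool.false_eq_true, if_false, Option.getD_none,
          List.nil_append]
        simp only [groupPairs]
        rw [List.map_append, List.map_cons, List.map_nil]
        rw [PySem.List.dedup_eq_ofList, PySem.List.dedup_eq_ofList,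
            PySem.Set.ofList_append_singleton, PySem.Set.add_of_not_mem (by
              rw [PySem.Set.mem_ofList]; exact hg)]
        rw [List.map_append]
        congr 1
        · apply List.map_congr_left
          intro g' hg'
          have hg'mem : g' ∈ qs.map Prod.fst := by
            rw [← PySem.List.mem_dedup (xs := qs.map Prod.fst)]
            simpa [PySem.List.dedup_eq_ofList] using hg'
          have hne : ¬ (g == g') = true := by
            simp only [beq_iff_eq]
            rintro rfl; exact hg hg'mem
          simp [List.filter_append, hne]
        · simp [List.filter_append, filter_eq_nil_of_not_mem_fst qs g hg]

-- A's nested loops are the single fold over the flattened pair list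
theorem creatNIndex_eq_build (n : Int) (vocabulary : List String) :
    creatNIndex n vocabulary
      = ((vocabulary.flatMap
            (fun word => (generateNGramsB n word).map (fun gram => (gram, word)))).foldl
          (fun d p => d.modify p.1 [] (· ++ [p.2])) PySem.Dict.empty).items := by
  unfold creatNIndex
  rw [List.foldl_flatMap]
  congr 1
  apply PySem.List.foldl_congr_mem
  intro d word _
  rw [generateNGrams_eq, List.foldl_map]
  apply PySem.List.foldl_congr_mem
  intro d' gram _
  exact step_eq_modify d' gram word

-- ===== VERDICT (by name: the statement is the Claim_ definition above) =====
theorem creatNIndex_spec : Claim_equal_creatNIndex := by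
  intro n vocabulary _
  unfold Spec_creatNIndex creatNIndex_alt
  rw [creatNIndex_eq_build, build_eq_groupPairs]
  rfl
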